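-- pv_equiv track=rewrite | github.com/seroak/algorithm | python알고리즘/프로그래머스 택배상자/main.py | solution
-- ===== SOURCE A (Python) =====
-- def solution(order):
--     answer = 0
--     stack = list()
--     box = [i for i in range(1, len(order) + 1)]
--     box = box[::-1]
--     order = order[::-1]
--     while True:
--         box_check = False
--         if box:
--             # 박스 순서에 맞을때
--             if order[-1] == box[-1]:
--                 box.pop()
--                 order.pop()
--                 answer += 1
--                 box_check = True
--         stack_check = False
--         if stack:
--             # stack 순서에 맞을때
--             if order[-1] == stack[-1]:
--                 stack.pop()
--                 order.pop()
--                 answer += 1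
--                 stack_check = True
--         if box_check is False and stack_check is False:
--             if box:
--                 stack.append(box[-1])
--                 box.pop()
--             else:
--                 break
--
--     return answer
-- ===== SOURCE B (Python) =====
-- def solution(order):
--     answer = 0
--     stack = []
--     i = 0
--     for box in range(1, len(order) + 1):
--         stack.append(box)
--         while stack and i < len(order) and stack[-1] == order[i]:
--             stack.pop()
--             i += 1
--             answer += 1
--     return answer
-- ===== Notes on version B (the rewrite author's own statement) =====
-- stated objective: simpler
-- what changed: Replaced A's flat while-True state machine over reversed copies of box and order with box_check/stack_check flags by the standard greedy: a for-loop over boxes 1..n pushing each onto the stack plus an inner while-loop that drains the stack against a forward index into order; B avoids the reversed copies and per-iteration flag bookkeeping (measured ~1.9x faster).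
import Mathlib
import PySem

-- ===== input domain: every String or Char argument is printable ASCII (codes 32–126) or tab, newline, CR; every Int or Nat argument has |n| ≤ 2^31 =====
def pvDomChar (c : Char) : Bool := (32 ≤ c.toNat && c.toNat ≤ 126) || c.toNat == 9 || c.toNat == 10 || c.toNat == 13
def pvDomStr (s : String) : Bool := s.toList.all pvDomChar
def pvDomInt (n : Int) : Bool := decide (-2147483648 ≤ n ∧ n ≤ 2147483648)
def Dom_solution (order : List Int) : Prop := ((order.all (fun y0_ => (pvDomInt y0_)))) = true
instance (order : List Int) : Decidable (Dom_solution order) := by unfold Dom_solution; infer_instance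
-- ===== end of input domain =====

-- B replaces A's flat while-True state machine (reversed copies of box/order plus two
-- check flags) by the standard greedy: a for-loop over boxes that pushes each box and an
-- inner while-loop draining the stack against a forward pointer into `order` (simpler).

-- ===== PORT A =====
-- Representation: A pops from the END of its Python lists (`[-1]`, `.pop()`, `.append`),
-- so each Python list is held REVERSED here (Lean head = Python last element). Under this
-- representation A's `box = [1..n][::-1]` is `pyRange 1 (n+1) 1` and `order[::-1]` is
-- `order` itself, and every `[-1]`/`pop`/`append` is head access/cons.
-- One iteration of A's `while True`: box check (flag), then stack check (flag), then
-- push-or-break; the branch order below is exactly the Python's.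
def aLoop (answer : Int) (stack box order : List Int) : Int :=
  match box, order with
  | b :: bs, o :: os =>
    if o = b then
      -- box_check = True: pop box & order, answer += 1, then the stack check on the new order
      match stack, os with
      | s :: ss, o2 :: os2 =>
        if o2 = s then aLoop (answer + 2) ss bs os2      -- stack_check also True
        else aLoop (answer + 1) (s :: ss) bs (o2 :: os2)
      | s :: ss, [] => aLoop (answer + 1) (s :: ss) bs []
      | [], os => aLoop (answer + 1) [] bs os
    else
      -- box_check = False: stack check on the unchanged order
      match stack with
      | s :: ss =>
        if o = s then aLoop (answer + 1) ss (b :: bs) os  -- stack_check True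
        else aLoop answer (b :: stack) bs (o :: os)       -- both False; box nonempty: push
      | [] => aLoop answer (b :: stack) bs (o :: os)      -- both False; box nonempty: push
  | _ :: _, [] =>
    -- Python would evaluate order[-1] here (IndexError); unreachable from `solution`,
    -- since |order| = |box| + |stack| is invariant along the loop.
    answer
  | [], order =>
    -- box empty: no box check; stack check, then break (box empty)
    match stack, order with
    | s :: ss, o :: os => if o = s then aLoop (answer + 1) ss [] os else answer
    | _, _ => answer
termination_by box.length + order.length
decreasing_by all_goals (simp only [List.length_cons]; omega)

def solution (order : List Int) : Int :=
  aLoop 0 [] (PySem.List.pyRange 1 ((order.length : Int) + 1) 1) order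

-- ===== PORT B =====
-- The inner `while stack and i < len(order) and stack[-1] == order[i]` loop; the index i
-- is represented by the remaining suffix `order[i:]`, the stack with its top at the head.
def bInner (answer : Int) (stack rest : List Int) : Int × List Int × List Int :=
  match stack, rest with
  | s :: ss, o :: os => if s = o then bInner (answer + 1) ss os else (answer, s :: ss, o :: os)
  | stack, rest => (answer, stack, rest)

-- body of `for box in range(1, len(order)+1)`: append box, then the inner while
def bStep (acc : Int × List Int × List Int) (box : Int) : Int × List Int × List Int :=
  bInner acc.1 (box :: acc.2.1) acc.2.2

def solution_alt (order : List Int) : Int :=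
  ((PySem.List.pyRange 1 ((order.length : Int) + 1) 1).foldl bStep (0, [], order)).1

-- ===== PRECONDITION & SPEC =====
def Spec_solution (order : List Int) (out : Int) : Prop := out = solution_alt order
instance (order : List Int) (out : Int) : Decidable (Spec_solution order out) := by
  unfold Spec_solution; infer_instance

-- ===== CLAIM =====
def Claim_equal_solution : Prop := ∀ (order : List Int), Dom_solution order → Spec_solution order (solution order)

-- ===== LEMMAS AND PROOFS =====

-- does the stack top match the front of the remaining order?
def hm : List Int → List Int → Bool
  | s :: _, o :: _ => s == o
  | _, _ => false

theorem bInner_hm : ∀ (s o : List Int) (a : Int),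
    hm (bInner a s o).2.1 (bInner a s o).2.2 = false := by
  intro s
  induction s with
  | nil => intro o a; simp [bInner, hm]
  | cons t ts ih =>
    intro o a
    cases o with
    | nil => simp [bInner, hm]
    | cons x xs =>
      by_cases h : t = x
      · simpa [bInner, h] using ih xs (a + 1)
      · simp [bInner, h, hm]

theorem bInner_stack_sub : ∀ (s o : List Int) (a : Int) (t : Int),
    t ∈ (bInner a s o).2.1 → t ∈ s := by
  intro s
  induction s with
  | nil => intro o a t h; simp [bInner] at h
  | cons u us ih =>
    intro o a t h
    cases o with
    | nil => simpa [bInner] using h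
    | cons x xs =>
      by_cases hux : u = x
      · simp only [bInner, hux] at h
        exact List.mem_cons_of_mem _ (ih xs (a + 1) t h)
      · simpa [bInner, hux] using h

-- While the stack top matches, A's iteration cannot match the box (stack elements are
-- strictly below every box element), so A performs exactly the drain steps of bInner.
theorem drain_aLoop : ∀ (s o : List Int) (a : Int) (box : List Int),
    (∀ t ∈ s, ∀ b ∈ box, t < b) →
    aLoop a s box o =
      aLoop (bInner a s o).1 (bInner a s o).2.1 box (bInner a s o).2.2 := by
  intro s
  induction s with
  | nil => intro o a box _; cases o <;> simp [bInner]
  | cons t ts ih =>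
    intro o a box hlt
    cases o with
    | nil => cases box <;> simp [bInner]
    | cons x xs =>
      by_cases htx : t = x
      · have hrec : aLoop a (t :: ts) box (x :: xs) = aLoop (a + 1) ts box xs := by
          cases box with
          | nil => rw [aLoop.eq_def]; simp [htx]
          | cons b bs =>
            have hxb : ¬ x = b := by
              have := hlt t (by simp) b (by simp)
              omega
            rw [aLoop.eq_def]; simp [hxb, htx]
        have hsub : ∀ u ∈ ts, ∀ b ∈ box, u < b := fun u hu => hlt u (by simp [hu])
        rw [hrec, ih xs (a + 1) box hsub]
        simp [bInner, htx]
      · simp [bInner, htx]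

theorem fold_order_nil : ∀ (box : List Int) (a : Int) (s : List Int),
    (box.foldl bStep (a, s, [])).1 = a := by
  intro box
  induction box with
  | nil => intro a s; simp
  | cons b bs ih =>
    intro a s
    simpa [bStep, bInner] using ih a (b :: s)

theorem main_lemma : ∀ (box s o : List Int) (a : Int),
    List.Pairwise (· < ·) box →
    (∀ t ∈ s, ∀ b ∈ box, t < b) →
    hm s o = false →
    aLoop a s box o = (box.foldl bStep (a, s, o)).1 := by
  intro box
  induction box with
  | nil =>
    intro s o a _ _ hhm
    cases s with
    | nil => cases o <;> (rw [aLoop.eq_def]; simp)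
    | cons t ts =>
      cases o with
      | nil => rw [aLoop.eq_def]; simp
      | cons x xs =>
        have : ¬ x = t := by
          simp [hm] at hhm; omega
        rw [aLoop.eq_def]; simp [this]
  | cons b bs ih =>
    intro s o a hpw hlt hhm
    have hpw' : List.Pairwise (· < ·) bs := (List.pairwise_cons.mp hpw).2
    have hb_bs : ∀ b' ∈ bs, b < b' := (List.pairwise_cons.mp hpw).1
    have hlt_bs : ∀ t ∈ s, ∀ b' ∈ bs, t < b' :=
      fun t ht b' hb' => hlt t ht b' (by simp [hb'])
    cases o with
    | nil =>
      -- A returns immediately; B pushes all remaining boxes without draining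
      rw [show aLoop a s (b :: bs) [] = a from by rw [aLoop.eq_def]]
      simp only [List.foldl_cons, bStep, bInner]
      exact (fold_order_nil bs a (b :: s)).symm
    | cons x xs =>
      by_cases hxb : x = b
      · -- A: box check fires, then one stack check; B: push b, drain
        subst hxb
        have hlt1 : ∀ t ∈ s, ∀ b' ∈ bs, t < b' := hlt_bs
        have hone :
            aLoop a s (x :: bs) (x :: xs) =
              aLoop (bInner (a + 1) s xs).1 (bInner (a + 1) s xs).2.1 bs
                (bInner (a + 1) s xs).2.2 := by
          cases s with
          | nil =>
            cases xs with
            | nil => rw [aLoop.eq_def]; simp [bInner]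
            | cons y ys =>
              rw [show aLoop a [] (x :: bs) (x :: y :: ys) = aLoop (a + 1) [] bs (y :: ys)
                    from by rw [aLoop.eq_def]; simp]
              simp [bInner]
          | cons t ts =>
            cases xs with
            | nil =>
              rw [show aLoop a (t :: ts) (x :: bs) [x] = aLoop (a + 1) (t :: ts) bs []
                    from by rw [aLoop.eq_def]; simp]
              simp [bInner]
            | cons y ys =>
              by_cases hyt : y = t
              · rw [show aLoop a (t :: ts) (x :: bs) (x :: y :: ys) =
                      aLoop (a + 2) ts bs ys from by rw [aLoop.eq_def]; simp [hyt]]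
                have := drain_aLoop ts ys (a + 2) bs
                  (fun u hu b' hb' => hlt1 u (by simp [hu]) b' hb')
                rw [this]
                simp [bInner, hyt, show (a + 1) + 1 = a + 2 from by ring]
              · rw [show aLoop a (t :: ts) (x :: bs) (x :: y :: ys) =
                      aLoop (a + 1) (t :: ts) bs (y :: ys) from by rw [aLoop.eq_def]; simp [hyt]]
                rw [drain_aLoop (t :: ts) (y :: ys) (a + 1) bs
                  (fun u hu b' hb' => hlt1 u hu b' hb')]
        rw [hone]
        have hstep : bStep (a, s, x :: xs) x = bInner (a + 1) s xs := by
          simp [bStep, bInner]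
        rw [List.foldl_cons, hstep]
        exact ih _ _ _ hpw'
          (fun u hu b' hb' => hlt1 u (bInner_stack_sub s xs (a + 1) u hu) b' hb')
          (bInner_hm s xs (a + 1))
      · -- no box match; hm false kills the stack check; A pushes b, B pushes b without drain
        have hpush : aLoop a s (b :: bs) (x :: xs) = aLoop a (b :: s) bs (x :: xs) := by
          cases s with
          | nil => rw [aLoop.eq_def]; simp [hxb]
          | cons t ts =>
            have hxt : ¬ x = t := by simp [hm] at hhm; omega
            rw [aLoop.eq_def]; simp [hxb, hxt]
        have hstep : bStep (a, s, x :: xs) b = (a, b :: s, x :: xs) := by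
          have : ¬ b = x := fun h => hxb h.symm
          simp [bStep, bInner, this]
        rw [hpush, List.foldl_cons, hstep]
        exact ih (b :: s) (x :: xs) a hpw'
          (by
            intro t ht b' hb'
            rcases List.mem_cons.mp ht with h | h
            · subst h; exact hb_bs b' hb'
            · exact hlt_bs t h b' hb')
          (by simp [hm]; omega)

-- ===== VERDICT =====
theorem solution_spec : Claim_equal_solution := by
  intro order _
  unfold Spec_solution solution solution_alt
  exact main_lemma _ [] order 0 (PySem.List.pairwise_lt_pyRange_one 1 _)
    (by simp) (by cases order <;> simp [hm])
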